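-- pv_equiv track=rewrite | github.com/vedro-universe/vedro | vedro/plugins/director/rich/_pretty_diff.py | _enumerate_next
-- ===== SOURCE A (Python) =====
-- from typing import Any, Generator, Iterable, List, Optional, Tuple
--
-- def _enumerate_next(
--
--     iterable: Iterable[str]
-- ) -> Generator[Tuple[str, Optional[str]], None, None]:
--     iterator = iter(iterable)
--     current_line = next(iterator, "")
--     for next_line in iterator:
--         yield current_line, next_line
--         current_line = next_line
--     yield current_line, None
-- ===== SOURCE B (Python) =====
-- from typing import Iterable, List, Optional, Tuple
--
--
-- def _enumerate_next(iterable: Iterable[str]):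
--     lines: List[str] = list(iterable) or [""]
--     yield from zip(lines, lines[1:] + [None])
-- ===== Notes on version B (the rewrite author's own statement) =====
-- stated objective: idiomatic
-- what changed: Replaces the streaming next()/running-variable loop with materializing the list once and pairing it with its shifted self via zip(lines, lines[1:] + [None]).
import Mathlib
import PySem

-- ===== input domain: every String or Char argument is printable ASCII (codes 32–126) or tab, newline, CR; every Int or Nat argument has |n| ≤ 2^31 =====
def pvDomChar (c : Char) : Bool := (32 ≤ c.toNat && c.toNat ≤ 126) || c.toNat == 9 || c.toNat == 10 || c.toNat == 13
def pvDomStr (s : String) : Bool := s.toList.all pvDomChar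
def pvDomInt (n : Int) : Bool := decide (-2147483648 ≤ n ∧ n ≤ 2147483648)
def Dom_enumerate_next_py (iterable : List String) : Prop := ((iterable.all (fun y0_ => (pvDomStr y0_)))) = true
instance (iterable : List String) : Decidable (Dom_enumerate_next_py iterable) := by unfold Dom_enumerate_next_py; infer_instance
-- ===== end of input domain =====

-- B replaces A's streaming next()/running-variable loop with materializing the
-- list once and zipping it with its shifted self (idiomatic; same cost).

-- ===== PORT A =====
-- the for-loop over the remaining iterator, carrying current_line
def enumNextLoop (current_line : String) : List String → List (String × Option String)
  | [] => [(current_line, none)]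
  | next_line :: rest => (current_line, next_line) :: enumNextLoop next_line rest

def enumerate_next_py (iterable : List String) : List (String × Option String) :=
  match iterable with
  | [] => enumNextLoop "" []          -- next(iterator, "") on an empty iterator
  | h :: t => enumNextLoop h t

-- ===== PORT B =====
def enumerate_next_py_alt (iterable : List String) : List (String × Option String) :=
  let lines := if iterable = [] then [""] else iterable
  lines.zip ((lines.drop 1).map some ++ [none])

-- ===== PRECONDITION & SPEC =====
def Spec_enumerate_next_py (iterable : List String) (out : List (String × Option String)) : Prop := out = enumerate_next_py_alt iterable
instance (iterable : List String) (out : List (String × Option String)) : Decidable (Spec_enumerate_next_py iterable out) := by unfold Spec_enumerate_next_py; infer_instance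

-- ===== CLAIM (what is proved, stated in full; the proofs are below) =====
def Claim_equal_enumerate_next_py : Prop := ∀ (iterable : List String), Dom_enumerate_next_py iterable → Spec_enumerate_next_py iterable (enumerate_next_py iterable)

-- ===== LEMMAS AND PROOFS =====
theorem enumNextLoop_eq_zip (cur : String) (xs : List String) :
    enumNextLoop cur xs = (cur :: xs).zip (xs.map some ++ [none]) := by
  induction xs generalizing cur with
  | nil => simp [enumNextLoop]
  | cons x rest ih => simp [enumNextLoop, ih x]

-- ===== VERDICT (by name: the statement is the Claim_ definition above) =====
theorem enumerate_next_py_spec : Claim_equal_enumerate_next_py := by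
  intro iterable _
  unfold Spec_enumerate_next_py enumerate_next_py enumerate_next_py_alt
  cases iterable with
  | nil => simp [enumNextLoop_eq_zip]
  | cons h t => simp [enumNextLoop_eq_zip]
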